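-- pv_equiv track=rewrite | github.com/Michanix/Math-Stat-Homework | ms5.py | build_interval_row
-- ===== SOURCE A (Python) =====
-- def filter_data(data, list_of_intervals, k):
--     values = [[] for i in range(k)]
--     for i in range(len(data)):
--         for j in range(len(list_of_intervals)):
--             if list_of_intervals[j][0] <= data[i] <= list_of_intervals[j][1]:
--                 values[j].append(data[i])
--     return values
--
-- def build_interval_row(arr, low_bound, width):
--     arr = sorted(arr)
--     # создаем интервалы с нижней границой и шириной
--     # в виде списка из тюплей (нижняя, верхняя)
--     intervals = [(i, i+width) for i in range(low_bound, arr[-1]+width, width)[:-1]]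
--     k = len(intervals)
--     # вызываем функию filter_data() которой передаём массив,
--     # вычисленный на прошлой строке интервалы
--     # и количество интервалов k
--     filtered_values = filter_data(arr, intervals, k)
--     # подсчитываем количество значений в каждом интервале
--     filtered_values_count = [len(i) for i in filtered_values]
--     # составляем интервальный вариационный ряд,
--     # который представлен ввиде dictionary
--     table = dict(zip(intervals, filtered_values_count))
--     return table
-- ===== SOURCE B (Python) =====
-- def build_interval_row(arr, low_bound, width):
--     # One counting pass using direct bin-index arithmetic instead of
--     # scanning every interval for every data point.
--     top = max(arr)
--     intervals = [(i, i + width) for i in range(low_bound, top + width, width)[:-1]]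
--     k = len(intervals)
--     counts = [0] * k
--     for x in arr:
--         d = x - low_bound
--         if d < 0:
--             continue
--         q, r = divmod(d, width)
--         if 0 <= q < k:
--             counts[q] += 1
--         if r == 0 and 1 <= q <= k:
--             counts[q - 1] += 1
--     return {intervals[j]: counts[j] for j in range(k)}
-- ===== Notes on version B (the rewrite author's own statement) =====
-- stated objective: faster
-- what changed: Replaces the nested scan of every interval for every (sorted) data point with a single counting pass that computes each point's bin index by divmod (double-counting shared boundaries), using max(arr) instead of sorting.
import Mathlib
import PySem

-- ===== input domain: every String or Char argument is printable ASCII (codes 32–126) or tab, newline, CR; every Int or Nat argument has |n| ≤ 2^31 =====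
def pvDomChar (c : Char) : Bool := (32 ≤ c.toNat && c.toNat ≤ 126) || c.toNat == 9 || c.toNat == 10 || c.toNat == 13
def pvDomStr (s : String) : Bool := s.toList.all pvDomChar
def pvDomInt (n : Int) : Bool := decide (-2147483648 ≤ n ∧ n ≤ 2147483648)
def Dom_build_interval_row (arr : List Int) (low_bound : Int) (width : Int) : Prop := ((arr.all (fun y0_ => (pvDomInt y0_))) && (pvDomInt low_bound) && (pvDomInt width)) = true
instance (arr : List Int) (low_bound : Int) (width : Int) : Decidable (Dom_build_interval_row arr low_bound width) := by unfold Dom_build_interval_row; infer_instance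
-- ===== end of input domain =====

-- B replaces A's nested interval-by-interval scan of the sorted data with a single
-- counting pass that bins each point by divmod; measured asymptotically faster (O(n+k) vs O(n*k)).

-- ===== PORT A =====
-- filter_data(data, list_of_intervals, k): nested index loops, values[j].append(data[i])
def filterData (data : List Int) (list_of_intervals : List (Int × Int)) (k : Int) : List (List Int) :=
  data.foldl
    (fun values x =>
      list_of_intervals.zipIdx.foldl
        (fun values p =>
          if p.1.1 ≤ x ∧ x ≤ p.1.2 then values.modify p.2 (fun v => v ++ [x]) else values)
        values)
    (List.replicate k.toNat [])

def build_interval_row (arr : List Int) (low_bound : Int) (width : Int) : List (Int × Int × Int) :=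
  let arrS := PySem.List.sorted arr (fun x => x)
  match PySem.List.pyGet? arrS (-1) with
  | none => []  -- arr == []: Python raises IndexError (excluded by Pre_)
  | some last =>
    -- width == 0 makes Python's range() raise ValueError (excluded by Pre_); pyRange is [] there
    let intervals := (PySem.List.slice (PySem.List.pyRange low_bound (last + width) width)
        none (some (-1))).map (fun i => (i, i + width))
    let k := (intervals.length : Int)
    let filtered_values := filterData arrS intervals k
    let filtered_values_count := filtered_values.map (fun i => (i.length : Int))
    -- dict(zip(intervals, counts)): the interval keys are pairwise distinct for width ≠ 0,
    -- so the dict is exactly the zipped association list in insertion order, as flat triples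
    (intervals.zip filtered_values_count).map (fun p => (p.1.1, p.1.2, p.2))

-- ===== PORT B =====
def build_interval_row_alt (arr : List Int) (low_bound : Int) (width : Int) : List (Int × Int × Int) :=
  match PySem.List.max? arr (fun x => x) with
  | none => []  -- max([]) raises ValueError (excluded by Pre_)
  | some top =>
    let intervals := (PySem.List.slice (PySem.List.pyRange low_bound (top + width) width)
        none (some (-1))).map (fun i => (i, i + width))
    let k := intervals.length
    let counts :=
      arr.foldl
        (fun counts x =>
          let d := x - low_bound
          if d < 0 then counts
          else
            -- q, r = divmod(d, width): exact for width ≠ 0 (width = 0 is excluded by Pre_)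
            let q := PySem.Int.floordiv d width
            let r := PySem.Int.mod d width
            let counts := if 0 ≤ q ∧ q < (k : Int) then counts.modify q.toNat (· + 1) else counts
            if r = 0 ∧ 1 ≤ q ∧ q ≤ (k : Int) then counts.modify (q - 1).toNat (· + 1) else counts)
        (List.replicate k (0 : Int))
    (List.range k).map (fun (j : Nat) =>
      ((PySem.List.pyGetD intervals (j : Int) (0, 0)).1,
       (PySem.List.pyGetD intervals (j : Int) (0, 0)).2,
       PySem.List.pyGetD counts (j : Int) 0))

-- ===== PRECONDITION & SPEC =====
-- Pre_ excludes exactly the inputs where Python A raises: arr == [] (IndexError on arr[-1],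
-- ValueError in B's max) and width == 0 (ValueError in range()).
def Pre_build_interval_row (arr : List Int) (low_bound : Int) (width : Int) : Prop :=
  arr ≠ [] ∧ width ≠ 0
instance (arr : List Int) (low_bound : Int) (width : Int) : Decidable (Pre_build_interval_row arr low_bound width) := by unfold Pre_build_interval_row; infer_instance

def pvWitness_build_interval_row : List Int × Int × Int := ([0, 3, 4], 0, 2)

def Spec_build_interval_row (arr : List Int) (low_bound : Int) (width : Int) (out : List (Int × Int × Int)) : Prop := out = build_interval_row_alt arr low_bound width
instance (arr : List Int) (low_bound : Int) (width : Int) (out : List (Int × Int × Int)) : Decidable (Spec_build_interval_row arr low_bound width out) := by unfold Spec_build_interval_row; infer_instance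

-- ===== CLAIM (what is proved, stated in full; the proofs are below) =====
def Claim_equal_build_interval_row : Prop := ∀ (arr : List Int) (low_bound : Int) (width : Int), Dom_build_interval_row arr low_bound width → Pre_build_interval_row arr low_bound width → Spec_build_interval_row arr low_bound width (build_interval_row arr low_bound width)

-- ===== LEMMAS AND PROOFS =====

-- modify on a map over range is a pointwise ite
theorem lem_modify_map_range {β : Type} (g : Nat → β) (f : β → β) (k i : Nat) :
    ((List.range k).map g).modify i f
      = (List.range k).map (fun j => if j = i then f (g j) else g j) := by
  apply List.ext_getElem
  · simp [List.length_modify]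
  · intro j hj hj'
    simp only [List.getElem_modify, List.getElem_map, List.getElem_range]
    by_cases h : i = j
    · simp [h]
    · rw [if_neg h, if_neg (fun hc : j = i => h hc.symm)]
  
-- the inner index loop of filter_data, shifted by one position
theorem lem_inner_shift (x : Int) (ivs : List (Int × Int)) (off : Nat)
    (v0 : List Int) (vals : List (List Int)) :
    (ivs.zipIdx (off + 1)).foldl
        (fun values p =>
          if p.1.1 ≤ x ∧ x ≤ p.1.2 then values.modify p.2 (fun v => v ++ [x]) else values)
        (v0 :: vals)
      = v0 :: (ivs.zipIdx off).foldl
        (fun values p =>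
          if p.1.1 ≤ x ∧ x ≤ p.1.2 then values.modify p.2 (fun v => v ++ [x]) else values)
        vals := by
  induction ivs generalizing off vals with
  | nil => simp
  | cons iv rest ih =>
    simp only [List.zipIdx_cons, List.foldl_cons]
    by_cases h : iv.1 ≤ x ∧ x ≤ iv.2
    · rw [if_pos h, if_pos h, List.modify_cons, if_neg (Nat.succ_ne_zero off)]
      simp only [Nat.add_sub_cancel]
      exact ih (off + 1) _
    · rw [if_neg h, if_neg h]
      exact ih (off + 1) _

-- the inner index loop of filter_data is a positional zipWith
theorem lem_inner_zero (x : Int) (ivs : List (Int × Int)) (vals : List (List Int))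
    (h : vals.length = ivs.length) :
    (ivs.zipIdx).foldl
        (fun values p =>
          if p.1.1 ≤ x ∧ x ≤ p.1.2 then values.modify p.2 (fun v => v ++ [x]) else values)
        vals
      = List.zipWith (fun iv v => if iv.1 ≤ x ∧ x ≤ iv.2 then v ++ [x] else v) ivs vals := by
  induction ivs generalizing vals with
  | nil => cases vals <;> simp_all
  | cons iv rest ih =>
    cases vals with
    | nil => simp at h
    | cons v vs =>
      simp only [List.zipIdx_cons, List.foldl_cons, List.zipWith_cons_cons]
      have hm : (v :: vs).modify 0 (fun w => w ++ [x]) = (v ++ [x]) :: vs := by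
        simp [List.modify_cons]
      by_cases hc : iv.1 ≤ x ∧ x ≤ iv.2
      · rw [if_pos hc, if_pos hc, hm, lem_inner_shift, ih vs (by simpa using h)]
      · rw [if_neg hc, if_neg hc, lem_inner_shift, ih vs (by simpa using h)]

theorem lem_zipWith_self {α β : Type} (f : α → α → β) (l : List α) :
    List.zipWith f l l = l.map (fun a => f a a) := by
  induction l with
  | nil => rfl
  | cons a t ih => simp

-- the outer loop of filter_data, on an accumulator that is a map over the intervals
theorem lem_filter_fold (ivs : List (Int × Int)) (data : List Int) (g : Int × Int → List Int) :
    data.foldl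
        (fun values x =>
          ivs.zipIdx.foldl
            (fun values p =>
              if p.1.1 ≤ x ∧ x ≤ p.1.2 then values.modify p.2 (fun v => v ++ [x]) else values)
            values)
        (ivs.map g)
      = ivs.map (fun iv => g iv ++ data.filter (fun y => decide (iv.1 ≤ y ∧ y ≤ iv.2))) := by
  induction data generalizing g with
  | nil => simp
  | cons y rest ih =>
    rw [List.foldl_cons, lem_inner_zero y ivs (ivs.map g) (by simp), List.zipWith_map_right,
      lem_zipWith_self]
    rw [ih (fun iv => if iv.1 ≤ y ∧ y ≤ iv.2 then g iv ++ [y] else g iv)]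
    apply List.map_congr_left
    intro iv _
    by_cases hc : iv.1 ≤ y ∧ y ≤ iv.2
    · simp [hc]
    · simp [hc]

theorem lem_zip_map_right {α β : Type} (l : List α) (g : α → β) :
    l.zip (l.map g) = l.map (fun a => (a, g a)) := by
  simpa using @List.zip_map' _ _ _ id g l

-- filter_data computes, per interval, the list of data points inside it
theorem lem_filterData (data : List Int) (ivs : List (Int × Int)) :
    filterData data ivs (ivs.length : Int)
      = ivs.map (fun iv => data.filter (fun y => decide (iv.1 ≤ y ∧ y ≤ iv.2))) := by
  unfold filterData
  have h0 : List.replicate ((ivs.length : Int)).toNat ([] : List Int)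
      = ivs.map (fun _ => ([] : List Int)) := by
    rw [Int.toNat_natCast]
    exact (List.map_const).symm
  rw [h0, lem_filter_fold ivs data (fun _ => [])]
  simp

-- in a ≤-pairwise list every element is at most the last one
theorem lem_pairwise_le_getLast (l : List Int) (hp : l.Pairwise (· ≤ ·)) (hn : l ≠ []) :
    ∀ x ∈ l, x ≤ l.getLast hn := by
  induction l with
  | nil => exact absurd rfl hn
  | cons a t ih =>
    intro x hx
    rcases List.pairwise_cons.mp hp with ⟨ha, ht⟩
    cases t with
    | nil => simp at hx ⊢; omega
    | cons b t' =>
      rw [List.getLast_cons (by simp)]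
      rcases List.mem_cons.mp hx with rfl | hx'
      · exact ha _ (List.getLast_mem (by simp))
      · exact ih ht (by simp) x hx'

-- last element of the sorted list = max
theorem lem_pyGet_last (arr : List Int) (h : arr ≠ []) :
    PySem.List.pyGet? (PySem.List.sorted arr (fun x => x)) (-1)
      = PySem.List.max? arr (fun x => x) := by
  obtain ⟨m, hm⟩ : ∃ m, PySem.List.max? arr (fun x => x) = some m := by
    cases hmax : PySem.List.max? arr (fun x => x) with
    | none => exact absurd ((PySem.List.max?_eq_none_iff _ _).mp hmax) h
    | some t => exact ⟨t, rfl⟩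
  rw [hm]
  set s := PySem.List.sorted arr (fun x => x) with hs
  have hsne : s ≠ [] := by rw [hs, Ne, PySem.List.sorted_eq_nil_iff]; exact h
  have hlen : 0 < s.length := List.length_pos_iff.mpr hsne
  have hidx : PySem.List.pyIdx? s.length (-1) = some (s.length - 1) := by
    simp [PySem.List.pyIdx?]
    omega
  have hget : PySem.List.pyGet? s (-1) = s[s.length - 1]? := by
    simp [PySem.List.pyGet?, hidx]
  rw [hget, List.getElem?_eq_getElem (by omega), ← List.getLast_eq_getElem hsne]
  congr 1
  apply le_antisymm
  · exact PySem.List.max?_isMax hm _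
      ((PySem.List.mem_sorted arr (fun x => x) false _).mp (List.getLast_mem hsne))
  · exact lem_pairwise_le_getLast s (PySem.List.sorted_pairwise arr _) hsne m
      ((PySem.List.mem_sorted arr (fun x => x) false _).mpr (PySem.List.max?_mem hm))

-- dropping the last element of a mapped range
theorem lem_dropLast_map_range {β : Type} (f : Nat → β) (n : Nat) :
    ((List.range n).map f).dropLast = (List.range (n - 1)).map f := by
  cases n with
  | zero => simp
  | succ m => simp [List.range_succ]

-- bin arithmetic: membership of x in interval j, via divmod, for positive width
theorem lem_arith (lo w x : Int) (j : Nat) (hw : 0 < w) :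
    (lo + w * j ≤ x ∧ x ≤ lo + w * j + w)
      ↔ (0 ≤ x - lo ∧
          (PySem.Int.floordiv (x - lo) w = (j : Int)
            ∨ (PySem.Int.mod (x - lo) w = 0 ∧ PySem.Int.floordiv (x - lo) w = (j : Int) + 1))) := by
  have hqr := PySem.Int.floordiv_mul_add_mod (x - lo) w
  have hr0 := PySem.Int.mod_nonneg (x - lo) hw
  have hrw := PySem.Int.mod_lt (x - lo) hw
  set q := PySem.Int.floordiv (x - lo) w with hq
  set r := PySem.Int.mod (x - lo) w with hr
  have hj0 : (0 : Int) ≤ (j : Int) := Int.natCast_nonneg j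
  constructor
  · rintro ⟨h1, h2⟩
    -- w * j ≤ x - lo = q * w + r and x - lo ≤ w * j + w
    have hle : (j : Int) ≤ q := by
      have : w * (j : Int) < w * (q + 1) := by nlinarith
      have := lt_of_mul_lt_mul_left this (le_of_lt hw)
      omega
    have hge : q ≤ (j : Int) + 1 := by
      have : w * q ≤ w * ((j : Int) + 1) := by nlinarith
      exact le_of_mul_le_mul_left this hw
    have hdnn : 0 ≤ x - lo := by nlinarith
    refine ⟨hdnn, ?_⟩
    by_cases hcase : q = (j : Int)
    · exact Or.inl hcase
    · have hq1 : q = (j : Int) + 1 := by omega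
      have : r = 0 := by nlinarith
      exact Or.inr ⟨this, hq1⟩
  · rintro ⟨hdnn, hcase | ⟨hr0', hq1⟩⟩
    · constructor <;> nlinarith
    · constructor <;> nlinarith

-- one step of B's counting loop, on counts represented over range k
theorem lem_step (lo w : Int) (hw : 0 < w) (k : Nat) (g : Nat → Int) (x : Int) :
    (let d := x - lo
     if d < 0 then ((List.range k).map g)
     else
       let q := PySem.Int.floordiv d w
       let r := PySem.Int.mod d w
       let counts := if 0 ≤ q ∧ q < (k : Int) then ((List.range k).map g).modify q.toNat (· + 1)
                     else ((List.range k).map g)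
       if r = 0 ∧ 1 ≤ q ∧ q ≤ (k : Int) then counts.modify (q - 1).toNat (· + 1) else counts)
      = (List.range k).map
          (fun j => g j + if lo + w * j ≤ x ∧ x ≤ lo + w * j + w then 1 else 0) := by
  by_cases hdneg : x - lo < 0
  · simp only [if_pos hdneg]
    symm
    apply List.map_congr_left
    intro j _
    have hnot : ¬ (lo + w * (j : Int) ≤ x ∧ x ≤ lo + w * (j : Int) + w) := by
      intro hmem
      have := ((lem_arith lo w x j hw).mp hmem).1
      omega
    rw [if_neg hnot, add_zero]
  · simp only [if_neg hdneg]
    push Not at hdneg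
    have hqr := PySem.Int.floordiv_mul_add_mod (x - lo) w
    have hr0 := PySem.Int.mod_nonneg (x - lo) hw
    have hrw := PySem.Int.mod_lt (x - lo) hw
    set q := PySem.Int.floordiv (x - lo) w with hq
    set r := PySem.Int.mod (x - lo) w with hr
    have hq0 : 0 ≤ q := by
      by_contra hneg
      push Not at hneg
      have h1 : q ≤ -1 := by omega
      have := mul_le_mul_of_nonneg_right h1 (le_of_lt hw)
      omega
    have hqt : ((q.toNat : Int)) = q := Int.toNat_of_nonneg hq0
    by_cases h1 : 0 ≤ q ∧ q < (k : Int)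
    · rw [if_pos h1, lem_modify_map_range g (· + 1) k q.toNat]
      by_cases h2 : r = 0 ∧ 1 ≤ q ∧ q ≤ (k : Int)
      · rw [if_pos h2,
          lem_modify_map_range (fun j => if j = q.toNat then g j + 1 else g j) (· + 1) k (q - 1).toNat]
        apply List.map_congr_left
        intro j hj
        have hjk : (j : Int) < (k : Int) := by exact_mod_cast List.mem_range.mp hj
        have harith := lem_arith lo w x j hw
        by_cases e1 : j = (q - 1).toNat
        · have hqj : q = (j : Int) + 1 := by omega
          rw [if_pos e1, if_neg (by omega), if_pos (harith.mpr ⟨hdneg, Or.inr ⟨h2.1, hqj⟩⟩)]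
        · by_cases e2 : j = q.toNat
          · have hqj : q = (j : Int) := by omega
            rw [if_neg e1, if_pos e2, if_pos (harith.mpr ⟨hdneg, Or.inl hqj⟩)]
          · rw [if_neg e1, if_neg e2,
              if_neg (fun hm => by rcases (harith.mp hm).2 with hc | ⟨_, hc⟩ <;> omega), add_zero]
      · rw [if_neg h2]
        apply List.map_congr_left
        intro j hj
        have hjk : (j : Int) < (k : Int) := by exact_mod_cast List.mem_range.mp hj
        have harith := lem_arith lo w x j hw
        by_cases e2 : j = q.toNat
        · have hqj : q = (j : Int) := by omega
          rw [if_pos e2, if_pos (harith.mpr ⟨hdneg, Or.inl hqj⟩)]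
        · rw [if_neg e2,
            if_neg (fun hm => by
              rcases (harith.mp hm).2 with hc | ⟨hrz, hc⟩
              · omega
              · exact h2 ⟨hrz, by omega, by omega⟩), add_zero]
    · rw [if_neg h1]
      by_cases h2 : r = 0 ∧ 1 ≤ q ∧ q ≤ (k : Int)
      · rw [if_pos h2, lem_modify_map_range g (· + 1) k (q - 1).toNat]
        have hqk : q = (k : Int) := by omega
        apply List.map_congr_left
        intro j hj
        have hjk : (j : Int) < (k : Int) := by exact_mod_cast List.mem_range.mp hj
        have harith := lem_arith lo w x j hw
        by_cases e1 : j = (q - 1).toNat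
        · have hqj : q = (j : Int) + 1 := by omega
          rw [if_pos e1, if_pos (harith.mpr ⟨hdneg, Or.inr ⟨h2.1, hqj⟩⟩)]
        · rw [if_neg e1,
            if_neg (fun hm => by rcases (harith.mp hm).2 with hc | ⟨_, hc⟩ <;> omega), add_zero]
      · rw [if_neg h2]
        symm
        apply List.map_congr_left
        intro j hj
        have hjk : (j : Int) < (k : Int) := by exact_mod_cast List.mem_range.mp hj
        have harith := lem_arith lo w x j hw
        rw [if_neg (fun hm => by
          rcases (harith.mp hm).2 with hc | ⟨hrz, hc⟩
          · exact h1 ⟨hq0, by omega⟩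
          · exact h2 ⟨hrz, by omega, by omega⟩), add_zero]

-- B's counting loop computes the per-interval counts
theorem lem_counts (lo w : Int) (hw : 0 < w) (k : Nat) (data : List Int) (g : Nat → Int) :
    data.foldl
        (fun counts x =>
          let d := x - lo
          if d < 0 then counts
          else
            let q := PySem.Int.floordiv d w
            let r := PySem.Int.mod d w
            let counts := if 0 ≤ q ∧ q < (k : Int) then counts.modify q.toNat (· + 1) else counts
            if r = 0 ∧ 1 ≤ q ∧ q ≤ (k : Int) then counts.modify (q - 1).toNat (· + 1) else counts)
        ((List.range k).map g)
      = (List.range k).map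
          (fun j => g j + (data.countP (fun y => decide (lo + w * j ≤ y ∧ y ≤ lo + w * j + w)) : Int)) := by
  induction data generalizing g with
  | nil => simp
  | cons y rest ih =>
    rw [List.foldl_cons]
    have hstep := lem_step lo w hw k g y
    simp only [] at hstep
    rw [hstep, ih (fun j => g j + if lo + w * (j : Int) ≤ y ∧ y ≤ lo + w * (j : Int) + w then 1 else 0)]
    apply List.map_congr_left
    intro j _
    simp only [List.countP_cons, decide_eq_true_eq]
    by_cases hp : lo + w * (j : Int) ≤ y ∧ y ≤ lo + w * (j : Int) + w
    · rw [if_pos hp, if_pos hp]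
      push_cast
      ring
    · rw [if_neg hp, if_neg hp]
      push_cast
      ring

-- lem_counts, restated in the if-distributed shape the goal carries (definitionally equal)
theorem lem_counts' (lo w : Int) (hw : 0 < w) (k : Nat) (data : List Int) (g : Nat → Int) :
    data.foldl
        (fun counts x =>
          if x - lo < 0 then counts
          else
            if PySem.Int.mod (x - lo) w = 0 ∧ 1 ≤ PySem.Int.floordiv (x - lo) w ∧
                PySem.Int.floordiv (x - lo) w ≤ (k : Int) then
              (if 0 ≤ PySem.Int.floordiv (x - lo) w ∧ PySem.Int.floordiv (x - lo) w < (k : Int) then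
                  counts.modify (PySem.Int.floordiv (x - lo) w).toNat (· + 1)
                else counts).modify (PySem.Int.floordiv (x - lo) w - 1).toNat (· + 1)
            else
              if 0 ≤ PySem.Int.floordiv (x - lo) w ∧ PySem.Int.floordiv (x - lo) w < (k : Int) then
                counts.modify (PySem.Int.floordiv (x - lo) w).toNat (· + 1)
              else counts)
        ((List.range k).map g)
      = (List.range k).map
          (fun j => g j + (data.countP (fun y => decide (lo + w * j ≤ y ∧ y ≤ lo + w * j + w)) : Int)) :=
  lem_counts lo w hw k data g

-- when every data point is below low_bound, B's counting loop is the identity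
theorem lem_fold_const (lo w kk : Int) (data : List Int) (init : List Int)
    (hx : ∀ x ∈ data, x - lo < 0) :
    data.foldl
        (fun counts x =>
          if x - lo < 0 then counts
          else
            if PySem.Int.mod (x - lo) w = 0 ∧ 1 ≤ PySem.Int.floordiv (x - lo) w ∧
                PySem.Int.floordiv (x - lo) w ≤ kk then
              (if 0 ≤ PySem.Int.floordiv (x - lo) w ∧ PySem.Int.floordiv (x - lo) w < kk then
                  counts.modify (PySem.Int.floordiv (x - lo) w).toNat (· + 1)
                else counts).modify (PySem.Int.floordiv (x - lo) w - 1).toNat (· + 1)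
            else
              if 0 ≤ PySem.Int.floordiv (x - lo) w ∧ PySem.Int.floordiv (x - lo) w < kk then
                counts.modify (PySem.Int.floordiv (x - lo) w).toNat (· + 1)
              else counts)
        init
      = init := by
  induction data generalizing init with
  | nil => rfl
  | cons y rest ih =>
    rw [List.foldl_cons, if_pos (hx y (by simp))]
    exact ih init (fun x hxm => hx x (List.mem_cons_of_mem _ hxm))

-- negative width: a nonempty interval list forces low_bound > every data point
theorem lem_range_neg (lo b w : Int) (hw : w < 0)
    (h : 1 ≤ ((PySem.List.pyRange lo b w).dropLast).length) : b - w < lo := by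
  rw [List.length_dropLast] at h
  simp only [PySem.List.pyRange, if_neg (show ¬ w = 0 by omega), if_neg (show ¬ 0 < w by omega),
    List.length_map, List.length_range] at h
  by_cases hbl : b < lo
  · rw [if_pos hbl] at h
    have h2 : (2 : Int) ≤ (lo - b + -w - 1) / -w := by omega
    have := (Int.le_ediv_iff_mul_le (show (0 : Int) < -w by omega)).mp h2
    omega
  · rw [if_neg hbl] at h
    omega

-- ===== VERDICT =====
theorem build_interval_row_spec : Claim_equal_build_interval_row := by
  intro arr lo w _hdom hpre
  obtain ⟨hne, hw0⟩ := hpre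
  unfold Spec_build_interval_row build_interval_row build_interval_row_alt
  obtain ⟨top, htop⟩ : ∃ t, PySem.List.max? arr (fun x => x) = some t := by
    cases hmax : PySem.List.max? arr (fun x => x) with
    | none => exact absurd ((PySem.List.max?_eq_none_iff _ _).mp hmax) hne
    | some t => exact ⟨t, rfl⟩
  have hget := lem_pyGet_last arr hne
  rw [htop] at hget
  simp only [hget, htop]
  rw [lem_filterData, List.map_map, lem_zip_map_right, List.map_map]
  rcases lt_or_gt_of_ne hw0 with hwneg | hwpos
  · -- width < 0: every interval (i, i+w) is empty and, if any interval exists, every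
    -- data point lies strictly below low_bound, so both sides carry count 0
    set R := PySem.List.slice (PySem.List.pyRange lo (top + w) w) none (some (-1)) with hR
    rcases eq_or_ne R [] with hRnil | hRne
    · simp [hRnil]
    · have hlen : 0 < R.length := List.length_pos_iff.mpr hRne
      have htoplt : top < lo := by
        have h' : 1 ≤ ((PySem.List.pyRange lo (top + w) w).dropLast).length := by
          rw [← PySem.List.slice_to_neg_one, ← hR]; exact hlen
        have := lem_range_neg lo (top + w) w hwneg h'
        omega
      have hxneg : ∀ x ∈ arr, x - lo < 0 := by
        intro x hx
        have := PySem.List.max?_isMax htop x hx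
        simp only [] at this
        omega
      rw [lem_fold_const lo w _ arr _ hxneg]
      apply List.ext_getElem
      · simp
      · intro j hj hj'
        simp only [List.getElem_map, List.getElem_range, Function.comp_apply]
        rw [PySem.List.pyGetD_natCast, PySem.List.pyGetD_natCast]
        have hjR : j < R.length := by simpa using hj
        rw [List.getD_eq_getElem _ _ (by simpa using hjR), List.getD_replicate _ (by simpa using hjR)]
        simp only [List.getElem_map]
        refine congrArg (fun c => (R[j], R[j] + w, c)) ?_
        rw [← List.countP_eq_length_filter]
        have : List.countP (fun y => decide (R[j] ≤ y ∧ y ≤ R[j] + w))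
            (PySem.List.sorted arr fun x => x) = 0 := by
          rw [List.countP_eq_zero]
          intro y _
          simp only [decide_eq_true_eq]
          intro hy
          omega
        rw [this]
        rfl
  · -- width > 0
    rw [PySem.List.slice_to_neg_one, PySem.List.pyRange_of_pos lo (top + w) hwpos,
      lem_dropLast_map_range]
    set M := (if lo < top + w then ((top + w - lo + w - 1) / w).toNat else 0) - 1 with hM
    simp only [List.map_map, List.length_map, List.length_range]
    rw [show List.replicate M (0 : Int) = (List.range M).map (fun _ => (0 : Int)) from by simp]
    rw [lem_counts' lo w hwpos M arr (fun _ => (0 : Int))]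
    apply List.map_congr_left
    intro j hj
    have hjM : j < M := List.mem_range.mp hj
    simp only [Function.comp_apply]
    rw [PySem.List.pyGetD_natCast, PySem.List.pyGetD_natCast,
      PySem.List.getD_map_range _ _ _ _ hjM, PySem.List.getD_map_range _ _ _ _ hjM]
    rw [← List.countP_eq_length_filter,
      List.Perm.countP_eq _ (PySem.List.sorted_perm arr (fun x => x) false)]
    simp
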